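-- pv_equiv track=rewrite | github.com/panos-dim/mission-planning | backend/schemas/order_templates.py | _normalize_days_of_week
-- ===== SOURCE A (Python) =====
-- from typing import Any, Dict, List, Literal, Optional
--
-- _VALID_WEEKDAYS = {"mon", "tue", "wed", "thu", "fri", "sat", "sun"}
--
-- def _normalize_days_of_week(value: Optional[List[str]]) -> Optional[List[str]]:
--     """Normalize weekday tokens to lowercase unique abbreviations."""
--     if value is None:
--         return value
--
--     normalized: List[str] = []
--     seen = set()
--     for day in value:
--         normalized_day = day.strip().lower()
--         if normalized_day not in _VALID_WEEKDAYS: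
--             raise ValueError(
--                 f"Invalid weekday: {day}. Must be one of {sorted(_VALID_WEEKDAYS)}"
--             )
--         if normalized_day not in seen:
--             normalized.append(normalized_day)
--             seen.add(normalized_day)
--     return normalized
-- ===== SOURCE B (Python) =====
-- from typing import List, Optional
--
-- _VALID_WEEKDAYS = {"mon", "tue", "wed", "thu", "fri", "sat", "sun"}
--
-- def _normalize_days_of_week(value: Optional[List[str]]) -> Optional[List[str]]:
--     """Normalize weekday tokens to lowercase unique abbreviations."""
--     if value is None:
--         return value
--     return _dedup_normalize(value, 0)
--
-- def _dedup_normalize(value: List[str], i: int) -> List[str]: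
--     """Recursively: validate+normalize the i-th token, then drop its later
--     duplicates from the recursively-built tail (keeps first occurrences)."""
--     if i == len(value):
--         return []
--     nd = value[i].strip().lower()
--     if nd not in _VALID_WEEKDAYS:
--         raise ValueError(
--             f"Invalid weekday: {value[i]}. Must be one of {sorted(_VALID_WEEKDAYS)}"
--         )
--     tail = _dedup_normalize(value, i + 1)
--     return [nd] + [d for d in tail if d != nd]
-- ===== Notes on version B (the rewrite author's own statement) =====
-- stated objective: alternative
-- what changed: Replaces A's iterative loop with an inline seen-set by structural recursion that keeps no auxiliary state: each step validates/normalizes the head token and dedups by filtering that token out of the recursively-built tail, so first occurrences survive with no set or dict at all.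
import Mathlib
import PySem

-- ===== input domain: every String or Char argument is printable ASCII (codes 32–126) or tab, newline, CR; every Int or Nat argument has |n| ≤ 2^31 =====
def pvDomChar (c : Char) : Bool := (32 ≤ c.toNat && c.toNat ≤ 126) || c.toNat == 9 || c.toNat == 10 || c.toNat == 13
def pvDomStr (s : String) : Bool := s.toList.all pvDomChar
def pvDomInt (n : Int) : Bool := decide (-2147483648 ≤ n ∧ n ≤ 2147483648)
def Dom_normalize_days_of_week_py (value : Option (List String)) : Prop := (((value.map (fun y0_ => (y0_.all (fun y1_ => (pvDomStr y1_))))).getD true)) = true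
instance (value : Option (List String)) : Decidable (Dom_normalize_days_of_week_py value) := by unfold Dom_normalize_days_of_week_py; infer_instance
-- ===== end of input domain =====

-- B replaces A's iterative loop with an inline seen-set by stateless structural recursion
-- that dedups by filtering the head token out of the recursively-built tail; same cost class.

-- ===== PORT A =====
def pvValidWeekdays : PySem.Set String :=
  PySem.Set.ofList ["mon", "tue", "wed", "thu", "fri", "sat", "sun"]

def pvNorm (day : String) : String := PySem.Str.lower (PySem.Str.strip day)

-- A's loop; state = (normalized, seen). 'none' = the ValueError branch (excluded by Pre_).
def pvALoop : List String → List String → PySem.Set String → Option (List String)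
  | [], normalized, _ => some normalized
  | day :: rest, normalized, seen =>
    let nd := pvNorm day
    if ¬ (PySem.Set.contains pvValidWeekdays nd) then none
    else if ¬ (PySem.Set.contains seen nd) then
      pvALoop rest (normalized ++ [nd]) (PySem.Set.add seen nd)
    else pvALoop rest normalized seen

def normalize_days_of_week_py (value : Option (List String)) : Option (List String) :=
  match value with
  | none => none
  | some xs => pvALoop xs [] PySem.Set.empty

-- ===== PORT B =====
-- B's recursion (_dedup_normalize): validate/normalize the head, then filter the head's
-- normalized form out of the recursively-built tail. 'none' = the ValueError branch.
def pvBGo : List String → Option (List String)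
  | [] => some []
  | day :: rest =>
    let nd := pvNorm day
    if ¬ (PySem.Set.contains pvValidWeekdays nd) then none
    else (pvBGo rest).map (fun tail => nd :: tail.filter (fun d => d != nd))

def normalize_days_of_week_py_alt (value : Option (List String)) : Option (List String) :=
  match value with
  | none => none
  | some xs => pvBGo xs

-- ===== PRECONDITION & SPEC =====
-- Pre_ excludes exactly the inputs containing a token that does not normalize to a valid weekday,
-- on which A raises ValueError.
def Pre_normalize_days_of_week_py (value : Option (List String)) : Prop :=
  ((value.map (fun xs => xs.all (fun d => PySem.Set.contains pvValidWeekdays (pvNorm d)))).getD true) = true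
instance (value : Option (List String)) : Decidable (Pre_normalize_days_of_week_py value) := by
  unfold Pre_normalize_days_of_week_py; infer_instance

def pvWitness_normalize_days_of_week_py : Option (List String) :=
  some ["Mon ", "tue", " mon", "SUN"]

def Spec_normalize_days_of_week_py (value : Option (List String)) (out : Option (List String)) : Prop := out = normalize_days_of_week_py_alt value
instance (value : Option (List String)) (out : Option (List String)) : Decidable (Spec_normalize_days_of_week_py value out) := by unfold Spec_normalize_days_of_week_py; infer_instance

-- ===== CLAIM (what is proved, stated in full; the proofs are below) =====
def Claim_equal_normalize_days_of_week_py : Prop := ∀ (value : Option (List String)), Dom_normalize_days_of_week_py value → Pre_normalize_days_of_week_py value → Spec_normalize_days_of_week_py value (normalize_days_of_week_py value)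

-- ===== LEMMAS AND PROOFS =====

-- The pure dedup-by-filtering recursion both programs compute (B directly, A via its seen-set).
def pvFDD : List String → List String
  | [] => []
  | a :: l => a :: (pvFDD l).filter (fun d => d != a)

-- pvFDD commutes with filtering one element out.
theorem pvFDD_filter (a : String) (l : List String) :
    pvFDD (l.filter (fun d => d != a)) = (pvFDD l).filter (fun d => d != a) := by
  induction l with
  | nil => rfl
  | cons b t ih =>
    by_cases hba : b = a
    · subst hba
      simp only [pvFDD, List.filter_cons, bne_self_eq_false, Bool.false_eq_true, if_false,
        List.filter_filter, Bool.and_self]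
      exact ih
    · have hb : (b != a) = true := by simp [hba]
      simp only [pvFDD, List.filter_cons, hb, if_true, List.filter_filter]
      rw [ih, List.filter_filter]
      exact congrArg (b :: ·) (List.filter_congr (fun d _ => Bool.and_comm _ _))

-- B's recursion, with all tokens valid, computes pvFDD of the normalized tokens.
theorem pvBGo_eq (xs : List String)
    (hall : ∀ d ∈ xs, PySem.Set.contains pvValidWeekdays (pvNorm d) = true) :
    pvBGo xs = some (pvFDD (xs.map pvNorm)) := by
  induction xs with
  | nil => rfl
  | cons day rest ih =>
    have hd : PySem.Set.contains pvValidWeekdays (pvNorm day) = true := hall day (by simp)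
    simp only [pvBGo, hd, not_true, List.map_cons]
    rw [ih (fun d hdm => hall d (by simp [hdm]))]
    simp [pvFDD]

-- A's loop, with all tokens valid, appends pvFDD of the normalized tokens not yet seen.
theorem pvALoop_eq (xs : List String) :
    ∀ (acc : List String) (seen : PySem.Set String),
      (∀ d ∈ xs, PySem.Set.contains pvValidWeekdays (pvNorm d) = true) →
      pvALoop xs acc seen =
        some (acc ++ pvFDD ((xs.map pvNorm).filter (fun x => !(PySem.Set.contains seen x)))) := by
  induction xs with
  | nil => intro acc seen _; simp [pvALoop, pvFDD]
  | cons day rest ih =>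
    intro acc seen hall
    have hd : PySem.Set.contains pvValidWeekdays (pvNorm day) = true := hall day (by simp)
    have hrest : ∀ d ∈ rest, PySem.Set.contains pvValidWeekdays (pvNorm d) = true :=
      fun d hdm => hall d (by simp [hdm])
    simp only [pvALoop, hd, not_true, List.map_cons, List.filter_cons]
    by_cases hmem : PySem.Set.contains seen (pvNorm day) = true
    · simp only [hmem, Bool.not_true, Bool.false_eq_true]
      exact ih acc seen hrest
    · have hmem' : PySem.Set.contains seen (pvNorm day) = false := by simpa using hmem
      simp only [hmem', Bool.not_false, if_true]
      rw [ih (acc ++ [pvNorm day]) (PySem.Set.add seen (pvNorm day)) hrest]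
      -- filter over 'seen.add nd' = filter over 'seen' then drop nd
      have hsplit : (rest.map pvNorm).filter
            (fun x => !(PySem.Set.contains (PySem.Set.add seen (pvNorm day)) x))
          = ((rest.map pvNorm).filter (fun x => !(PySem.Set.contains seen x))).filter
              (fun d => d != pvNorm day) := by
        rw [List.filter_filter]
        apply List.filter_congr
        intro x _
        by_cases hx : x = pvNorm day
        · subst hx
          simp
        · have hiff : PySem.Set.contains (PySem.Set.add seen (pvNorm day)) x
              = PySem.Set.contains seen x := by
            by_cases hxs : x ∈ seen
            · rw [(PySem.Set.contains_iff _ _).mpr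
                ((PySem.Set.mem_add seen (pvNorm day) x).mpr (Or.inl hxs)),
                (PySem.Set.contains_iff _ _).mpr hxs]
            · have h1 : x ∉ PySem.Set.add seen (pvNorm day) := fun h => by
                rcases (PySem.Set.mem_add seen (pvNorm day) x).mp h with h' | h'
                · exact hxs h'
                · exact hx h'
              have e1 : PySem.Set.contains (PySem.Set.add seen (pvNorm day)) x = false := by
                cases h : PySem.Set.contains (PySem.Set.add seen (pvNorm day)) x with
                | false => rfl
                | true => exact absurd ((PySem.Set.contains_iff _ _).mp h) h1
              have e2 : PySem.Set.contains seen x = false := by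
                cases h : PySem.Set.contains seen x with
                | false => rfl
                | true => exact absurd ((PySem.Set.contains_iff _ _).mp h) hxs
              rw [e1, e2]
          rw [hiff]
          simp [hx]
      rw [hsplit, pvFDD_filter]
      simp [pvFDD]

-- ===== VERDICT (by name: the statement is the Claim_ definition above) =====
theorem normalize_days_of_week_py_spec : Claim_equal_normalize_days_of_week_py := by
  intro value _hdom hpre
  unfold Spec_normalize_days_of_week_py
  cases value with
  | none => rfl
  | some xs =>
    have hall : ∀ d ∈ xs, PySem.Set.contains pvValidWeekdays (pvNorm d) = true := by
      simp only [Pre_normalize_days_of_week_py, Option.map_some, Option.getD_some,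
        List.all_eq_true] at hpre
      exact hpre
    simp only [normalize_days_of_week_py, normalize_days_of_week_py_alt,
      pvBGo_eq xs hall, pvALoop_eq xs [] PySem.Set.empty hall, List.nil_append]
    congr 2
    have hempt : (xs.map pvNorm).filter
        (fun x => !(PySem.Set.contains (PySem.Set.empty : PySem.Set String) x))
        = xs.map pvNorm :=
      List.filter_eq_self.mpr (fun x _ => by simp [PySem.Set.contains, PySem.Set.empty])
    rw [hempt]
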